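-- pv_equiv track=rewrite | github.com/SAG145/Project-Euler | PEP141 - Square Progressive Numbers.py | square_divisors
-- ===== SOURCE A (Python) =====
-- def divisors(divi,pf,d = 1,i = 0):
--     if i == len(pf):
--         divi.append(d)
--     else:
--         for pow in range(pf[i][1] + 1):
--             divisors(divi,pf,d*pf[i][0]**pow,i + 1)
--
-- def square_divisors(pf):
--     pf_powers_squ = []
--     distinct_pf = tuple(dict.fromkeys(pf))
--     for dpf in distinct_pf:
--         pf_powers_squ.append([dpf,0])
--     for p in pf:
--         pf_powers_squ[distinct_pf.index(p)][1] += 2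
--     divi = []
--     divisors(divi,pf_powers_squ)
--     return sorted(divi)[::-1]
-- ===== SOURCE B (Python) =====
-- def square_divisors(pf):
--     counts = {}
--     for p in pf:
--         counts[p] = counts.get(p, 0) + 1
--     divs = [1]
--     for p, c in counts.items():
--         divs = [d * p ** k for d in divs for k in range(2 * c + 1)]
--     return sorted(divs, reverse=True)
-- ===== Notes on version B (the rewrite author's own statement) =====
-- stated objective: simpler
-- what changed: B replaces A's index-mutating exponent table and depth-first recursive divisor enumeration with a counting dict and an iterative product: the divisor list grows prime by prime (each existing divisor multiplied by every power of the next prime), then one descending sort.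
import Mathlib
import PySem

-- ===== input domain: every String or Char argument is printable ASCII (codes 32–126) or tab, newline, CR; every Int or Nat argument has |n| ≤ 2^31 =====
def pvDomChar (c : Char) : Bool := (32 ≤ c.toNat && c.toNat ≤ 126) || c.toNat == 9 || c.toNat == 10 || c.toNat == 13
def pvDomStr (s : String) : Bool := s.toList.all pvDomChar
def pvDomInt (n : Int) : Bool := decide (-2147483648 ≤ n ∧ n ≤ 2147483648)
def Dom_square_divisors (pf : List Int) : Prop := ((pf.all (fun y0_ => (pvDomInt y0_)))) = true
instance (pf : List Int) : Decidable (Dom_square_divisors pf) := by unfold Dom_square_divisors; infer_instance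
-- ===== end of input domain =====

-- B builds the exponent table with a counting dict and the divisor list iteratively (per-prime product growth)
-- instead of A's index-mutated pair list and depth-first recursion; return values proved equal on all inputs.

-- ===== PORT A =====
-- divisors(divi, pf, d=1, i=0): recursion over the remaining suffix of pf (i → structural recursion)
def divisorsA : List (Int × Int) → List Int → Int → List Int
  | [], divi, d => divi ++ [d]
  | (p, e) :: rest, divi, d =>
      (PySem.List.pyRange 0 (e + 1) 1).foldl
        (fun acc pow => divisorsA rest acc (d * p ^ pow.toNat)) divi

def square_divisors (pf : List Int) : List Int :=
  -- distinct_pf = tuple(dict.fromkeys(pf))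
  let distinct := PySem.List.dedup pf
  -- for dpf in distinct_pf: pf_powers_squ.append([dpf, 0])
  let pfps0 := distinct.foldl (fun ps dpf => ps ++ [(dpf, (0 : Int))]) []
  -- for p in pf: pf_powers_squ[distinct_pf.index(p)][1] += 2
  -- (the none branch of index? is unreachable — p ∈ pf is always in distinct; totality guard only)
  let pfps := pf.foldl (fun ps p =>
      match PySem.List.index? distinct p with
      | some i => ps.modify i (fun q => (q.1, q.2 + 2))
      | none => ps) pfps0
  let divi := divisorsA pfps [] 1
  -- sorted(divi)[::-1] ([::-1] on a list is exactly reverse)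
  (PySem.List.sorted divi (fun x => x) false).reverse

-- ===== PORT B =====
def square_divisors_alt (pf : List Int) : List Int :=
  -- counts[p] = counts.get(p, 0) + 1
  let counts := pf.foldl (fun d p => d.insert p (d.getD p 0 + 1)) PySem.Dict.empty
  -- divs = [d * p ** k for d in divs for k in range(2 * c + 1)]
  let divs := counts.items.foldl
      (fun divs pc =>
        divs.flatMap (fun d => (PySem.List.pyRange 0 (2 * pc.2 + 1) 1).map
          (fun k => d * pc.1 ^ k.toNat))) [1]
  -- sorted(divs, reverse=True)
  PySem.List.sorted divs (fun x => x) true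

-- ===== PRECONDITION & SPEC =====
def Spec_square_divisors (pf : List Int) (out : List Int) : Prop := out = square_divisors_alt pf
instance (pf : List Int) (out : List Int) : Decidable (Spec_square_divisors pf out) := by unfold Spec_square_divisors; infer_instance

-- ===== CLAIM (what is proved, stated in full; the proofs are below) =====
def Claim_equal_square_divisors : Prop := ∀ (pf : List Int), Dom_square_divisors pf → Spec_square_divisors pf (square_divisors pf)

-- ===== LEMMAS AND PROOFS =====

-- canonical divisor enumeration over (prime, count) pairs; exponents run 0..2c, first prime slowest
def gen : List (Int × Int) → Int → List Int
  | [], d => [d]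
  | (p, c) :: rest, d =>
      (PySem.List.pyRange 0 (2 * c + 1) 1).flatMap (fun k => gen rest (d * p ^ k.toNat))

-- modifying the i-th entry of a map over a Nodup list edits exactly the L[i] entry
theorem modify_map_nodup {α β : Type} [DecidableEq α] (L : List α) (hnd : L.Nodup)
    (i : Nat) (hi : i < L.length) (g : α → β) (h : β → β) :
    (L.map g).modify i h = L.map (fun q => if q = L[i] then h (g q) else g q) := by
  apply List.ext_getElem
  · simp
  · intro j hj hj'
    have hjL : j < L.length := by simpa using hj'
    simp only [List.getElem_modify, List.getElem_map]
    by_cases hij : i = j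
    · subst hij; simp
    · have : L[j] ≠ L[i] := by
        intro hEq
        exact hij ((List.Nodup.getElem_inj_iff hnd).mp hEq.symm)
      simp [hij, this]

-- A's increment loop computes, entrywise, 2 × the count of each distinct element
theorem pairs_fold (distinct : List Int) (hnd : distinct.Nodup)
    (l : List Int) (hl : ∀ x ∈ l, x ∈ distinct) (f : Int → Int) :
    l.foldl (fun ps p =>
      match PySem.List.index? distinct p with
      | some i => ps.modify i (fun q => (q.1, q.2 + 2))
      | none => ps) (distinct.map (fun q => (q, f q)))
    = distinct.map (fun q => (q, f q + 2 * l.count q)) := by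
  induction l generalizing f with
  | nil => simp
  | cons p l' ih =>
    have hp : p ∈ distinct := hl p (by simp)
    obtain ⟨i, hidx⟩ := Option.isSome_iff_exists.mp
      ((PySem.List.index?_isSome_iff distinct p).mpr hp)
    obtain ⟨hi, hLi, -⟩ := PySem.List.getElem_of_index?_eq_some hidx
    simp only [List.foldl_cons, hidx]
    rw [modify_map_nodup distinct hnd i hi]
    have step : (fun q => if q = distinct[i] then ((fun q : Int × Int => (q.1, q.2 + 2)) (q, f q)) else (q, f q))
        = fun q => (q, (fun r => if r = p then f r + 2 else f r) q) := by
      funext q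
      by_cases hq : q = p <;> simp [hLi, hq]
    rw [step, ih (fun x hx => hl x (by simp [hx]))]
    apply List.map_congr_left
    intro q hq
    by_cases hqp : q = p <;> simp [hqp, List.count_cons] <;> omega

-- A's recursion appends exactly the canonical enumeration (pairs carry doubled exponents)
theorem divisorsA_eq_gen (L : List (Int × Int)) :
    ∀ (divi : List Int) (d : Int),
    divisorsA (L.map (fun q => (q.1, 2 * q.2))) divi d = divi ++ gen L d := by
  induction L with
  | nil => intro divi d; simp [divisorsA, gen]
  | cons pc rest ih =>
    intro divi d
    obtain ⟨p, c⟩ := pc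
    simp only [List.map_cons, divisorsA, gen]
    have h1 := PySem.List.foldl_congr_mem (l := PySem.List.pyRange 0 (2 * c + 1) 1) (init := divi)
      (f := fun acc pow => divisorsA (rest.map (fun q => (q.1, 2 * q.2))) acc (d * p ^ pow.toNat))
      (g := fun acc pow => acc ++ gen rest (d * p ^ pow.toNat))
      (fun acc x _ => ih acc (d * p ^ x.toNat))
    rw [h1, PySem.List.foldl_append_eq_flatMap]

-- B's iterative loop computes the same canonical enumeration
theorem foldlB_eq_gen (L : List (Int × Int)) :
    ∀ (xs : List Int),
    L.foldl (fun divs pc =>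
        divs.flatMap (fun d => (PySem.List.pyRange 0 (2 * pc.2 + 1) 1).map
          (fun k => d * pc.1 ^ k.toNat))) xs
      = xs.flatMap (fun d => gen L d) := by
  induction L with
  | nil => intro xs; simp [gen]
  | cons pc rest ih =>
    intro xs
    obtain ⟨p, c⟩ := pc
    simp only [List.foldl_cons, ih, List.flatMap_assoc, List.flatMap_map]
    simp [gen]

-- sorted(xs)[::-1] = sorted(xs, reverse=True) on integers
theorem sorted_reverse_eq_sorted_rev (xs : List Int) :
    (PySem.List.sorted xs (fun x => x) false).reverse = PySem.List.sorted xs (fun x => x) true := by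
  apply PySem.List.eq_of_perm_of_pairwise_le_of_injective (fun x : Int => -x) neg_injective
  · exact ((PySem.List.sorted xs (fun x => x) false).reverse_perm.trans
      (PySem.List.sorted_perm xs (fun x => x) false)).trans
      (PySem.List.sorted_perm xs (fun x => x) true).symm
  · have := PySem.List.sorted_pairwise xs (fun x => x)
    rw [List.pairwise_reverse]
    exact this.imp (by intro a b h; omega)
  · exact (PySem.List.sorted_pairwise_rev xs (fun x => x)).imp (by intro a b h; omega)

-- ===== VERDICT (by name: the statement is the Claim_ definition above) =====
theorem square_divisors_spec : Claim_equal_square_divisors := by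
  intro pf _
  unfold Spec_square_divisors square_divisors square_divisors_alt
  dsimp only
  rw [PySem.Dict.foldl_insert_getD_add_one_eq_counter, PySem.Dict.items_counter,
      PySem.List.foldl_append_singleton_eq_map, List.nil_append, PySem.List.dedup_eq_ofList,
      foldlB_eq_gen]
  have hpairs := pairs_fold (PySem.Set.ofList pf) (PySem.Set.nodup_ofList pf) pf
    (fun x hx => (PySem.Set.mem_ofList (xs := pf) (y := x)).mpr hx) (fun _ => 0)
  simp only [zero_add] at hpairs
  rw [hpairs]
  have hmap : (PySem.Set.ofList pf).map (fun q => (q, 2 * (pf.count q : Int)))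
      = ((PySem.Set.ofList pf).map (fun k => (k, (pf.count k : Int)))).map (fun q => (q.1, 2 * q.2)) := by
    simp
  rw [hmap, divisorsA_eq_gen, List.nil_append]
  simp only [List.flatMap_cons, List.flatMap_nil, List.append_nil]
  exact sorted_reverse_eq_sorted_rev _
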